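-- pv_equiv track=rewrite | github.com/fj4444/ubscc25_backend | sail.py | merge_and_count_boats
-- ===== SOURCE A (Python) =====
-- def merge_and_count_boats(bookings):
--     """
--     合并重叠的预订时段并计算所需的最小船只数量。
--
--     该函数首先对预订进行排序，然后遍历它们以合并重叠的时段。
--     同时，它使用一个扫描线算法来计算在任何给定时间点上最大
--     的重叠数量，从而确定所需的最小船只数量。
--
--     Args:
--         bookings (list[list[int]]): 包含预订开始和结束时间的一系列列表。
--
--     Returns:
--         tuple: 包含两个元素的元组：
--                - sorted_merged_slots (list[list[int]]): 合并后的、排序的无重叠时段列表。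
--                - min_boats_needed (int): 满足所有预订所需的最小船只数量。
--     """
--     if not bookings:
--         return [], 0
--
--     # Part 1: 合并重叠的预订时段
--     # 按开始时间对预订进行排序
--     bookings.sort(key=lambda x: x[0])
--
--     merged_slots = []
--     current_start, current_end = bookings[0]
--
--     for next_start, next_end in bookings[1:]:
--         # 如果当前时段与下一个时段重叠（或紧挨着），则扩展当前时段的结束时间
--         if next_start <= current_end:
--             current_end = max(current_end, next_end)
--         else:
--             # 如果没有重叠，将当前时段添加到结果中，并开始一个新的时段
--             merged_slots.append([current_start, current_end])
--             current_start, current_end = next_start, next_end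
--
--     # 添加最后一个合并后的时段
--     merged_slots.append([current_start, current_end])
--
--     # Part 2: 计算所需的最小船只数量
--     # 创建一个事件列表，其中包含开始和结束事件
--     events = []
--     for start, end in bookings:
--         events.append((start, 1))  # 1 表示开始事件（增加一个预订）
--         events.append((end, -1))   # -1 表示结束事件（减少一个预订）
--
--     # 按时间对事件进行排序。如果时间相同，优先处理开始事件（+1）
--     events.sort(key=lambda x: (x[0], x[1]))
--
--     min_boats_needed = 0
--     current_boats = 0
--     for _, event_type in events:
--         current_boats += event_type
--         min_boats_needed = max(min_boats_needed, current_boats)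
--
--     return merged_slots, min_boats_needed
-- ===== SOURCE B (Python) =====
-- def merge_and_count_boats(bookings):
--     """Same result as A; merging updates the last merged slot in place, and the
--     boat count is computed by direct counting per start time (no event list, no
--     second sort).  Sorts `bookings` in place, like A."""
--     if not bookings:
--         return [], 0
--
--     bookings.sort(key=lambda x: x[0])
--
--     merged = [[bookings[0][0], bookings[0][1]]]
--     for s, e in bookings[1:]:
--         if s <= merged[-1][1]:
--             if e > merged[-1][1]:
--                 merged[-1][1] = e
--         else:
--             merged.append([s, e])
--
--     boats = 0
--     for s, _ in bookings:
--         active = sum(1 for a, _ in bookings if a <= s) \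
--                - sum(1 for _, b in bookings if b <= s)
--         if active > boats:
--             boats = active
--     return merged, boats
-- ===== Notes on version B (the rewrite author's own statement) =====
-- stated objective: alternative
-- what changed: Part 2 drops the event list, the second sort and the sweep: the boat count is the maximum over start times s of (#intervals with start<=s minus #intervals with end<=s); the merge pass keeps a merged list and updates its last slot in place instead of carrying a (current_start,current_end) accumulator. Both sort bookings in place like A.
import Mathlib
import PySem

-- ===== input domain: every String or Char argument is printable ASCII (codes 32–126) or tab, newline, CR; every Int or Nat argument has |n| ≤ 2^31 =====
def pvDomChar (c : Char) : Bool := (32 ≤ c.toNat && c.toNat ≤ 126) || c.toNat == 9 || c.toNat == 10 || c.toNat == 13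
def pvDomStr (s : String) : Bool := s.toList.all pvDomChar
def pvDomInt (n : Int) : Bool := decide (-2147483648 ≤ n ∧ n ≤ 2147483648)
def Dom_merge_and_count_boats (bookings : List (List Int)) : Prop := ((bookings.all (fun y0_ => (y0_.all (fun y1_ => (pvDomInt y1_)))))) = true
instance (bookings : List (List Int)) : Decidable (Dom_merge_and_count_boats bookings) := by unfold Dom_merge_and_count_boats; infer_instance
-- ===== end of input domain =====

-- B replaces A's event-list + second sort + sweep by a direct per-start overlap count and
-- updates the last merged slot in place (alternative algorithm, not faster).  Both A and B
-- sort `bookings` in place in Python; the equivalence proved here is about the return value.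

-- ===== PORT A =====
-- A-side helpers: the three loops of A.  The `| _ => …` fallbacks correspond to inputs on
-- which Python raises (unpacking a list whose length ≠ 2); those are excluded by Pre_.
def aMergeStep (st : List (List Int) × Int × Int) (nxt : List Int) : List (List Int) × Int × Int :=
  match nxt with
  | [ns, ne] =>
      if ns ≤ st.2.2 then (st.1, st.2.1, max st.2.2 ne)
      else (st.1 ++ [[st.2.1, st.2.2]], ns, ne)
  | _ => st

def aEventsStep (ev : List (Int × Int)) (b : List Int) : List (Int × Int) :=
  match b with
  | [s, e] => ev ++ [(s, 1)] ++ [(e, -1)]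
  | _ => ev

def aSweepStep (st : Int × Int) (ev : Int × Int) : Int × Int :=
  (max st.1 (st.2 + ev.2), st.2 + ev.2)

-- `x.headD 0` / `(x.drop 1).headD 0` port `x[0]` / `x[1]`; exact under Pre_ (length = 2).
def merge_and_count_boats (bookings : List (List Int)) : List (List Int) × Int :=
  if bookings = [] then ([], 0) else
  match PySem.List.sorted bookings (fun x => x.headD 0) with
  | [] => ([], 0)
  | first :: rest =>
    let st := rest.foldl aMergeStep ([], first.headD 0, (first.drop 1).headD 0)
    let merged := st.1 ++ [[st.2.1, st.2.2]]
    let events := (first :: rest).foldl aEventsStep []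
    let sevents := PySem.List.sorted2 events (fun x => x.1) (fun x => x.2)
    (merged, (sevents.foldl aSweepStep (0, 0)).1)

-- ===== PORT B =====
-- B-side helpers: the two loops of B.
def bMergeStep (m : List (List Int)) (nxt : List Int) : List (List Int) :=
  match nxt, m.getLast? with
  | [s, e], some [cs, ce] =>
      if s ≤ ce then (if ce < e then m.dropLast ++ [[cs, e]] else m)
      else m ++ [[s, e]]
  | _, _ => m

-- sum(1 for a,_ in bs if a <= s) - sum(1 for _,b in bs if b <= s)
def bCount (bs : List (List Int)) (s : Int) : Int :=
  (bs.countP (fun x => decide (x.headD 0 ≤ s)) : Int)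
    - (bs.countP (fun x => decide ((x.drop 1).headD 0 ≤ s)) : Int)

def bBoatStep (bs : List (List Int)) (bt : Int) (b : List Int) : Int :=
  match b with
  | [s, _] => if bt < bCount bs s then bCount bs s else bt
  | _ => bt

def merge_and_count_boats_alt (bookings : List (List Int)) : List (List Int) × Int :=
  if bookings = [] then ([], 0) else
  match PySem.List.sorted bookings (fun x => x.headD 0) with
  | [] => ([], 0)
  | first :: rest =>
    (rest.foldl bMergeStep [[first.headD 0, (first.drop 1).headD 0]],
     (first :: rest).foldl (bBoatStep (first :: rest)) 0)

-- ===== PRECONDITION & SPEC =====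
-- Python A raises (ValueError/IndexError while unpacking/indexing) on any booking whose
-- length is not exactly 2; Pre_ excludes exactly those inputs.
def Pre_merge_and_count_boats (bookings : List (List Int)) : Prop :=
  ∀ b ∈ bookings, b.length = 2
instance (bookings : List (List Int)) : Decidable (Pre_merge_and_count_boats bookings) := by
  unfold Pre_merge_and_count_boats; infer_instance

def pvWitness_merge_and_count_boats : List (List Int) := [[1, 3], [2, 4]]

def Spec_merge_and_count_boats (bookings : List (List Int)) (out : List (List Int) × Int) : Prop := out = merge_and_count_boats_alt bookings
instance (bookings : List (List Int)) (out : List (List Int) × Int) : Decidable (Spec_merge_and_count_boats bookings out) := by unfold Spec_merge_and_count_boats; infer_instance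

-- ===== CLAIM (what is proved, stated in full; the proofs are below) =====
def Claim_equal_merge_and_count_boats : Prop := ∀ (bookings : List (List Int)), Dom_merge_and_count_boats bookings → Pre_merge_and_count_boats bookings → Spec_merge_and_count_boats bookings (merge_and_count_boats bookings)

-- ===== LEMMAS AND PROOFS =====

-- a length-2 list is [s, e]
theorem len2_eq (b : List Int) (h : b.length = 2) : ∃ s e, b = [s, e] := by
  match b, h with
  | [s, e], _ => exact ⟨s, e, rfl⟩

-- Part 1: B's merge loop (updating the last slot) tracks A's (out, cs, ce) accumulator.
theorem mergeEq (rest : List (List Int)) (h : ∀ b ∈ rest, b.length = 2)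
    (out : List (List Int)) (cs ce : Int) :
    rest.foldl bMergeStep (out ++ [[cs, ce]]) =
      (rest.foldl aMergeStep (out, cs, ce)).1 ++
        [[(rest.foldl aMergeStep (out, cs, ce)).2.1, (rest.foldl aMergeStep (out, cs, ce)).2.2]] := by
  induction rest generalizing out cs ce with
  | nil => simp
  | cons b r ih =>
    obtain ⟨s, e, rfl⟩ := len2_eq b (h _ (List.mem_cons_self))
    have h' : ∀ x ∈ r, x.length = 2 := fun x hx => h x (List.mem_cons_of_mem _ hx)
    simp only [List.foldl_cons]
    by_cases hs : s ≤ ce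
    · have hb : bMergeStep (out ++ [[cs, ce]]) [s, e] = out ++ [[cs, max ce e]] := by
        simp only [bMergeStep, List.getLast?_concat, List.dropLast_concat]
        rw [if_pos hs]
        by_cases hce : ce < e
        · rw [if_pos hce, max_eq_right (le_of_lt hce)]
        · rw [if_neg hce, max_eq_left (by omega)]
      have ha : aMergeStep (out, cs, ce) [s, e] = (out, cs, max ce e) := by
        simp [aMergeStep, hs]
      rw [hb, ha]; exact ih h' out cs (max ce e)
    · have hb : bMergeStep (out ++ [[cs, ce]]) [s, e] = (out ++ [[cs, ce]]) ++ [[s, e]] := by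
        simp only [bMergeStep, List.getLast?_concat]
        rw [if_neg hs]
      have ha : aMergeStep (out, cs, ce) [s, e] = (out ++ [[cs, ce]], s, e) := by
        simp [aMergeStep, hs]
      rw [hb, ha]; exact ih h' (out ++ [[cs, ce]]) s e

-- the two events a booking contributes
def evts (b : List Int) : List (Int × Int) := [(b.headD 0, 1), ((b.drop 1).headD 0, -1)]

theorem eventsEq (bs : List (List Int)) (h : ∀ b ∈ bs, b.length = 2) :
    bs.foldl aEventsStep [] = bs.flatMap evts := by
  have hc : ∀ (acc : List (Int × Int)), ∀ b ∈ bs, aEventsStep acc b = acc ++ evts b := by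
    intro acc b hb
    obtain ⟨s, e, rfl⟩ := len2_eq b (h _ hb)
    simp [aEventsStep, evts]
  rw [PySem.List.foldl_congr_mem bs _ _ [] hc, PySem.List.foldl_append_eq_flatMap]
  simp

-- B's boat loop is a running max of bCount over the start times
theorem boatFoldEq (bs l : List (List Int)) (h : ∀ b ∈ l, b.length = 2) (a : Int) :
    l.foldl (bBoatStep bs) a = l.foldl (fun bt b => max bt (bCount bs (b.headD 0))) a := by
  refine PySem.List.foldl_congr_mem l _ _ a ?_
  intro acc b hb
  obtain ⟨s, e, rfl⟩ := len2_eq b (h _ hb)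
  simp only [bBoatStep, List.headD_cons]
  by_cases hlt : acc < bCount bs s
  · rw [if_pos hlt, max_eq_right (le_of_lt hlt)]
  · rw [if_neg hlt, max_eq_left (by omega)]

-- running max: membership form
theorem foldl_max_proj_mem {α : Type} (l : List α) (f : α → Int) (a : Int) :
    l.foldl (fun acc y => max acc (f y)) a = a ∨
      ∃ x ∈ l, l.foldl (fun acc y => max acc (f y)) a = f x := by
  induction l generalizing a with
  | nil => exact Or.inl rfl
  | cons x t ih =>
    simp only [List.foldl_cons]
    rcases ih (max a (f x)) with h | ⟨y, hy, hfy⟩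
    · by_cases hfa : f x ≤ a
      · exact Or.inl (by rw [h, max_eq_left hfa])
      · exact Or.inr ⟨x, List.mem_cons_self, by rw [h, max_eq_right (by omega)]⟩
    · exact Or.inr ⟨y, List.mem_cons_of_mem _ hy, hfy⟩

-- A's sweep loop, in recursive form
def sweep (m c : Int) : List (Int × Int) → Int
  | [] => m
  | e :: t => sweep (max m (c + e.2)) (c + e.2) t

theorem sweep_eq_foldl (L : List (Int × Int)) (m c : Int) :
    (L.foldl aSweepStep (m, c)).1 = sweep m c L := by
  induction L generalizing m c with
  | nil => rfl
  | cons e t ih => simpa [sweep, aSweepStep] using ih (max m (c + e.2)) (c + e.2)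

theorem sweep_ge_m (L : List (Int × Int)) (m c : Int) : m ≤ sweep m c L := by
  induction L generalizing m c with
  | nil => exact le_refl m
  | cons e t ih => exact le_trans (le_max_left _ _) (ih (max m (c + e.2)) (c + e.2))

theorem sweep_ge_prefix (P : List (Int × Int)) (hP : P ≠ []) (Q : List (Int × Int)) (m c : Int) :
    c + (P.map Prod.snd).sum ≤ sweep m c (P ++ Q) := by
  induction P generalizing m c with
  | nil => exact absurd rfl hP
  | cons e P' ih =>
    simp only [List.cons_append, sweep, List.map_cons, List.sum_cons]
    cases hP' : P' with
    | nil =>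
      subst hP'
      simpa using le_trans (le_max_right m (c + e.2)) (sweep_ge_m Q _ _)
    | cons z zs =>
      subst hP'
      have := ih (List.cons_ne_nil z zs) (max m (c + e.2)) (c + e.2)
      omega

theorem sweep_le (L : List (Int × Int)) (m c K : Int) (hm : m ≤ K)
    (h : ∀ P Q, L = P ++ Q → c + (P.map Prod.snd).sum ≤ K) : sweep m c L ≤ K := by
  induction L generalizing m c with
  | nil => exact hm
  | cons e t ih =>
    refine ih (max m (c + e.2)) (c + e.2) (max_le hm ?_) ?_
    · have := h [e] t rfl; simpa using this
    · intro P Q hPQ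
      have := h (e :: P) Q (by rw [hPQ, List.cons_append])
      simpa [add_assoc] using this

-- the lexicographic (Python tuple) order on events
def lexLE (a b : Int × Int) : Prop := a.1 < b.1 ∨ (a.1 = b.1 ∧ a.2 ≤ b.2)

def beforeLex (a b : Int × Int) : Bool :=
  decide (a.1 < b.1) || (!decide (b.1 < a.1) && decide (a.2 < b.2))

theorem sorted2_eq_foldl (E : List (Int × Int)) :
    PySem.List.sorted2 E (fun x => x.1) (fun x => x.2) =
      E.foldl (fun acc x => PySem.List.insertBy beforeLex x acc) [] := by
  rfl

theorem beforeLex_true {a b : Int × Int} (h : beforeLex a b = true) : lexLE a b := by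
  simp only [beforeLex, Bool.or_eq_true, Bool.and_eq_true, Bool.not_eq_eq_eq_not,
    Bool.not_true, decide_eq_true_eq, decide_eq_false_iff_not] at h
  unfold lexLE; omega

theorem beforeLex_false {a b : Int × Int} (h : beforeLex a b = false) : lexLE b a := by
  simp only [beforeLex, Bool.or_eq_false_iff, Bool.and_eq_false_iff, Bool.not_eq_eq_eq_not,
    Bool.not_false, decide_eq_true_eq, decide_eq_false_iff_not] at h
  unfold lexLE; omega

theorem lexLE_trans {a b c : Int × Int} (h1 : lexLE a b) (h2 : lexLE b c) : lexLE a c := by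
  unfold lexLE at *; omega

theorem pairwise_insertBy (x : Int × Int) (ys : List (Int × Int))
    (h : ys.Pairwise lexLE) : (PySem.List.insertBy beforeLex x ys).Pairwise lexLE := by
  induction ys with
  | nil => simp [PySem.List.insertBy]
  | cons y ys ih =>
    rw [List.pairwise_cons] at h
    obtain ⟨hy, hys⟩ := h
    by_cases hb : beforeLex x y = true
    · rw [show PySem.List.insertBy beforeLex x (y :: ys) = x :: y :: ys from by
        simp [PySem.List.insertBy, hb]]
      refine List.Pairwise.cons ?_ (List.Pairwise.cons hy hys)
      intro z hz
      rcases List.mem_cons.mp hz with rfl | hz'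
      · exact beforeLex_true hb
      · exact lexLE_trans (beforeLex_true hb) (hy z hz')
    · rw [show PySem.List.insertBy beforeLex x (y :: ys) = y :: PySem.List.insertBy beforeLex x ys from by
        simp [PySem.List.insertBy, hb]]
      refine List.Pairwise.cons ?_ (ih hys)
      intro z hz
      rcases (PySem.List.mem_insertBy _ _ _ _).mp hz with rfl | hz'
      · exact beforeLex_false (by simpa using hb)
      · exact hy z hz'

theorem pairwise_sorted2 (E : List (Int × Int)) :
    (PySem.List.sorted2 E (fun x => x.1) (fun x => x.2)).Pairwise lexLE := by
  rw [sorted2_eq_foldl]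
  suffices hgen : ∀ (l : List (Int × Int)) (acc : List (Int × Int)), acc.Pairwise lexLE →
      (l.foldl (fun acc x => PySem.List.insertBy beforeLex x acc) acc).Pairwise lexLE from
    hgen E [] (by simp)
  intro l
  induction l with
  | nil => intro acc hacc; exact hacc
  | cons x t ih => intro acc hacc; exact ih _ (pairwise_insertBy x acc hacc)

-- in a lexLE-sorted list, the events with time ≤ t form a prefix
theorem filter_eq_takeWhile (l : List (Int × Int)) (hl : l.Pairwise lexLE) (t : Int) :
    l.filter (fun q => decide (q.1 ≤ t)) = l.takeWhile (fun q => decide (q.1 ≤ t)) := by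
  induction l with
  | nil => rfl
  | cons x xs ih =>
    rw [List.pairwise_cons] at hl
    by_cases hx : x.1 ≤ t
    · simp [hx, ih hl.2]
    · have hnil : xs.filter (fun q => decide (q.1 ≤ t)) = [] := by
        refine List.filter_eq_nil_iff.mpr ?_
        intro y hy
        have := hl.1 y hy
        unfold lexLE at this
        simp only [decide_eq_true_eq]
        omega
      simp [hx, hnil]

-- total event weight below time t is exactly bCount
theorem sum_filter_events (bs : List (List Int)) (h : ∀ b ∈ bs, b.length = 2) (t : Int) :
    (((bs.flatMap evts).filter (fun q => decide (q.1 ≤ t))).map Prod.snd).sum = bCount bs t := by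
  induction bs with
  | nil => simp [bCount]
  | cons b r ih =>
    obtain ⟨s, e, rfl⟩ := len2_eq b (h _ (List.mem_cons_self))
    have hr : ∀ x ∈ r, x.length = 2 := fun x hx => h x (List.mem_cons_of_mem _ hx)
    simp only [List.flatMap_cons, List.filter_append, List.map_append, List.sum_append, ih hr]
    simp only [bCount, evts, List.countP_cons, List.headD_cons, List.drop_succ_cons,
      List.drop_zero, List.filter_cons, List.filter_nil, decide_eq_true_eq]
    split_ifs <;> simp <;> omega

-- shape of the events
theorem mem_events (bs : List (List Int)) (z : Int × Int) (hz : z ∈ bs.flatMap evts) :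
    (z.2 = 1 ∧ ∃ b ∈ bs, b.headD 0 = z.1) ∨ z.2 = -1 := by
  rw [List.mem_flatMap] at hz
  obtain ⟨b, hb, hzb⟩ := hz
  simp only [evts, List.mem_cons, List.not_mem_nil, or_false] at hzb
  rcases hzb with rfl | rfl
  · exact Or.inl ⟨rfl, b, hb, rfl⟩
  · exact Or.inr rfl

-- every prefix sum of the sorted event list is at most the max overlap count T
theorem prefix_sum_le (bs : List (List Int)) (L : List (Int × Int))
    (hpw : L.Pairwise lexLE)
    (hmem : ∀ z ∈ L, (z.2 = 1 ∧ ∃ b ∈ bs, b.headD 0 = z.1) ∨ z.2 = -1)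
    (hfil : ∀ t, ((L.filter (fun q => decide (q.1 ≤ t))).map Prod.snd).sum = bCount bs t)
    (T : Int) (hT0 : 0 ≤ T) (hTb : ∀ b ∈ bs, bCount bs (b.headD 0) ≤ T) :
    ∀ P Q, L = P ++ Q → (P.map Prod.snd).sum ≤ T := by
  intro P
  induction P using List.reverseRecOn with
  | nil => intro Q hL; simpa using hT0
  | append_singleton P' y ih =>
    intro Q hL
    have hyL : y ∈ L := by rw [hL]; simp
    have hpw' : (P' ++ [y] ++ Q).Pairwise lexLE := hL ▸ hpw
    rcases hmem y hyL with ⟨hy1, b, hb, hbt⟩ | hym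
    · -- y is a start event at time t := y.1
      have hPy : ∀ x ∈ P' ++ [y], (fun q : Int × Int => decide (q.1 ≤ y.1)) x = true := by
        intro x hx
        rcases List.mem_append.mp hx with hx' | hx''
        · have hxy : lexLE x y :=
            (List.pairwise_append.mp (List.pairwise_append.mp hpw').1).2.2 x hx' y (by simp)
          unfold lexLE at hxy
          simp only [decide_eq_true_eq]; omega
        · simp only [List.mem_singleton] at hx''
          subst hx''; simp
      have hfQ : ∀ z ∈ Q.filter (fun q : Int × Int => decide (q.1 ≤ y.1)), z.2 = 1 := by
        intro z hz
        have hzQ := List.mem_of_mem_filter hz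
        have hpz := List.of_mem_filter hz
        simp only [decide_eq_true_eq] at hpz
        have hyz : lexLE y z :=
          (List.pairwise_append.mp hpw').2.2 y (by simp) z hzQ
        have hz2 : z.2 = 1 ∨ z.2 = -1 := by
          rcases hmem z (by rw [hL]; exact List.mem_append_right _ hzQ) with ⟨h1, _⟩ | h2
          · exact Or.inl h1
          · exact Or.inr h2
        unfold lexLE at hyz; omega
      have hfL : L.filter (fun q : Int × Int => decide (q.1 ≤ y.1)) =
          (P' ++ [y]) ++ Q.filter (fun q : Int × Int => decide (q.1 ≤ y.1)) := by
        rw [hL, List.filter_append, List.filter_eq_self.mpr hPy]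
      have hsum := hfil y.1
      rw [hfL] at hsum
      simp only [List.map_append, List.sum_append] at hsum
      have hQnn : 0 ≤ ((Q.filter (fun q : Int × Int => decide (q.1 ≤ y.1))).map Prod.snd).sum := by
        refine List.sum_nonneg ?_
        intro v hv
        obtain ⟨z, hz, rfl⟩ := List.mem_map.mp hv
        rw [hfQ z hz]; norm_num
      have hle := hTb b hb
      rw [hbt] at hle
      simp only [List.map_append, List.map_cons, List.map_nil, List.sum_append,
        List.sum_cons, List.sum_nil] at hsum ⊢
      omega
    · -- y is an end event: dropping it only increases the sum
      have hih := ih ([y] ++ Q) (by rw [hL, List.append_assoc])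
      simp only [List.map_append, List.sum_append, List.map_cons, List.map_nil,
        List.sum_cons, List.sum_nil] at *
      omega

-- Part 2, assembled
theorem boatsEq (bs : List (List Int)) (h : ∀ b ∈ bs, b.length = 2) :
    ((PySem.List.sorted2 (bs.foldl aEventsStep []) (fun x => x.1) (fun x => x.2)).foldl
        aSweepStep (0, 0)).1 = bs.foldl (bBoatStep bs) 0 := by
  rw [sweep_eq_foldl, eventsEq bs h, boatFoldEq bs bs h 0]
  have hperm : (PySem.List.sorted2 (bs.flatMap evts) (fun x => x.1) (fun x => x.2)).Perm
      (bs.flatMap evts) := PySem.List.sorted2_perm _ _ _ _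
  have hpw := pairwise_sorted2 (bs.flatMap evts)
  generalize hLdef : PySem.List.sorted2 (bs.flatMap evts) (fun x => x.1) (fun x => x.2) = L at *
  have hfil : ∀ t, ((L.filter (fun q : Int × Int => decide (q.1 ≤ t))).map Prod.snd).sum
      = bCount bs t := by
    intro t
    rw [List.Perm.sum_eq (List.Perm.map Prod.snd (List.Perm.filter _ hperm))]
    exact sum_filter_events bs h t
  have hmem : ∀ z ∈ L, (z.2 = 1 ∧ ∃ b ∈ bs, b.headD 0 = z.1) ∨ z.2 = -1 := by
    intro z hz
    exact mem_events bs z ((List.Perm.mem_iff hperm).mp hz)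
  have hT0 : 0 ≤ bs.foldl (fun bt b => max bt (bCount bs (b.headD 0))) 0 :=
    (PySem.List.le_foldl_max_int bs (fun b => bCount bs (b.headD 0)) 0).1
  have hTb : ∀ b ∈ bs, bCount bs (b.headD 0) ≤
      bs.foldl (fun bt b => max bt (bCount bs (b.headD 0))) 0 :=
    (PySem.List.le_foldl_max_int bs (fun b => bCount bs (b.headD 0)) 0).2
  refine le_antisymm ?_ ?_
  · exact sweep_le L 0 0 _ hT0 (by
      intro P Q hPQ
      simpa using prefix_sum_le bs L hpw hmem hfil _ hT0 hTb P Q hPQ)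
  · rcases foldl_max_proj_mem bs (fun b => bCount bs (b.headD 0)) 0 with h0 | ⟨b, hb, hTeq⟩
    · rw [h0]; exact sweep_ge_m L 0 0
    · rw [hTeq]
      have htw := filter_eq_takeWhile L hpw (b.headD 0)
      cases hcase : L.takeWhile (fun q : Int × Int => decide (q.1 ≤ b.headD 0)) with
      | nil =>
        have : bCount bs (b.headD 0) = 0 := by
          rw [← hfil (b.headD 0), htw, hcase]; simp
        rw [this]; exact sweep_ge_m L 0 0
      | cons z zs =>
        have hsplit : L = (z :: zs) ++ L.dropWhile (fun q : Int × Int => decide (q.1 ≤ b.headD 0)) := by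
          conv_lhs => rw [← List.takeWhile_append_dropWhile
            (p := fun q : Int × Int => decide (q.1 ≤ b.headD 0)) (l := L)]
          rw [hcase]
        have hge := sweep_ge_prefix (z :: zs) (List.cons_ne_nil z zs)
          (L.dropWhile (fun q : Int × Int => decide (q.1 ≤ b.headD 0))) 0 0
        rw [← hsplit] at hge
        have hcnt : bCount bs (b.headD 0) = ((z :: zs).map Prod.snd).sum := by
          rw [← hfil (b.headD 0), htw, hcase]
        omega

-- ===== VERDICT (by name: the statement is the Claim_ definition above) =====
theorem merge_and_count_boats_spec : Claim_equal_merge_and_count_boats := by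
  intro bookings _ hpre
  unfold Spec_merge_and_count_boats merge_and_count_boats merge_and_count_boats_alt
  by_cases hb : bookings = []
  · simp [hb]
  · rw [if_neg hb, if_neg hb]
    cases hbs : PySem.List.sorted bookings (fun x => x.headD 0) with
    | nil => exact absurd ((PySem.List.sorted_eq_nil_iff _ _ _).mp hbs) hb
    | cons first rest =>
      have hall : ∀ b ∈ first :: rest, b.length = 2 := by
        intro b hbmem
        exact hpre b ((PySem.List.mem_sorted _ _ _ _).mp (hbs ▸ hbmem))
      have hrest : ∀ b ∈ rest, b.length = 2 := fun b hx => hall b (List.mem_cons_of_mem _ hx)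
      obtain ⟨s0, e0, hfirst⟩ := len2_eq first (hall _ (List.mem_cons_self))
      simp only []
      refine Prod.ext ?_ ?_
      · show (rest.foldl aMergeStep ([], first.headD 0, (first.drop 1).headD 0)).1 ++ _ =
          rest.foldl bMergeStep [[first.headD 0, (first.drop 1).headD 0]]
        rw [show [[first.headD 0, (first.drop 1).headD 0]] =
              [] ++ [[first.headD 0, (first.drop 1).headD 0]] from rfl,
            mergeEq rest hrest]
      · exact boatsEq (first :: rest) hall
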